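-- pv_equiv track=rewrite | github.com/jloutey-hash/geovac | debug/ls5_two_loop_scoping.py | two_loop_SE_O_count
-- ===== SOURCE A (Python) =====
-- def two_loop_SE_O_count(n_max: int) -> dict:
--     """Count the total number of allowed (n_int1, n_int2, q1, q2) terms for
--     the two-loop self-energy spectral sum at cutoff n_max.
--
--     Selection rules (each vertex):
--       - |n_a - n_b| <= q <= n_a + n_b
--       - n_a + n_b + q is odd
--
--     Two-vertex topology: n_ext -> n_int1 -> n_ext'
--     with photons q1, q2 attached at the two vertices. For Sigma(n_ext) we
--     have n_ext = n_ext' (external state matches), so the internal chain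
--     is n_ext -> n_int1 -> n_ext at vertex 1 and the internal line carries
--     n_int2 (the second loop). The exact diagram topology determines
--     which indices are summed; here we estimate the largest case (chain
--     diagram with all four modes free).
--     """
--     n_ext = 1  # use 2S (CH index 1) as a representative external state
--     count = 0
--     for n_int1 in range(n_max + 1):
--         # First vertex: q1 between n_ext and n_int1
--         q1_lo = abs(n_ext - n_int1)
--         q1_hi = n_ext + n_int1
--         for q1 in range(max(1, q1_lo), q1_hi + 1):
--             if (n_ext + n_int1 + q1) % 2 == 0:
--                 continue  # parity: must be odd
--             for n_int2 in range(n_max + 1):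
--                 # Second vertex: q2 between n_int1 and n_int2
--                 q2_lo = abs(n_int1 - n_int2)
--                 q2_hi = n_int1 + n_int2
--                 for q2 in range(max(1, q2_lo), q2_hi + 1):
--                     if (n_int1 + n_int2 + q2) % 2 == 0:
--                         continue
--                     count += 1
--     return {"n_max": n_max, "term_count": count}
-- ===== SOURCE B (Python) =====
-- def _parity_count(lo, hi, r):
--     """Number of integers q with lo <= q <= hi and q % 2 == r (closed form)."""
--     if hi < lo:
--         return 0
--     first = lo if lo % 2 == r else lo + 1
--     if first > hi:
--         return 0
--     return (hi - first) // 2 + 1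
--
--
-- def two_loop_SE_O_count(n_max: int) -> dict:
--     """Same count as the quadruple loop, but each photon-q loop is replaced by
--     an O(1) parity-range count, and the (q1, n_int2, q2) nest is factorized:
--     the inner double sum does not depend on q1, so the per-n_int1 contribution
--     is (number of valid q1) * (sum over n_int2 of valid q2 counts)."""
--     n_ext = 1
--     total = 0
--     for n1 in range(n_max + 1):
--         v1 = _parity_count(max(1, abs(n_ext - n1)), n_ext + n1, (n_ext + n1 + 1) % 2)
--         inner = 0
--         for n2 in range(n_max + 1):
--             inner += _parity_count(max(1, abs(n1 - n2)), n1 + n2, (n1 + n2 + 1) % 2)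
--         total += v1 * inner
--     return {"n_max": n_max, "term_count": total}
-- ===== Notes on version B (the rewrite author's own statement) =====
-- stated objective: faster
-- what changed: Replaced the two innermost photon-q loops with an O(1) closed-form parity-range count and factorized the (q1, n_int2, q2) nest into (number of valid q1) times (sum over n_int2 of valid q2 counts), turning O(n_max^4) into O(n_max^2).
import Mathlib
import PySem

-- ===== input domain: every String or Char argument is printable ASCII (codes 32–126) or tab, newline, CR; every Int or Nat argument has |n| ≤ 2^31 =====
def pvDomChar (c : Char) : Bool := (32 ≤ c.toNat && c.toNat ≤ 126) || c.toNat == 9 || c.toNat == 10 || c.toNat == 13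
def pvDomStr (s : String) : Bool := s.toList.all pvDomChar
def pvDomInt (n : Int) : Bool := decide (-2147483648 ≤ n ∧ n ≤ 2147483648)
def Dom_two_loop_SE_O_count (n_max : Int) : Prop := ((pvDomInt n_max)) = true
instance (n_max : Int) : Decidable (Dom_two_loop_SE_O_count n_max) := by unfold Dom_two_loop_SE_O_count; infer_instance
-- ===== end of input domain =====

-- B replaces A's two innermost photon loops by a closed-form parity-range count and
-- factorizes the (q1, n_int2, q2) nest into (#valid q1) * (sum over n_int2): O(n_max^2) vs O(n_max^4).

-- ===== PORT A =====
def two_loop_SE_O_count (n_max : Int) : List (String × Int) :=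
  let n_ext : Int := 1
  let count : Int :=
    (PySem.List.pyRange 0 (n_max + 1) 1).foldl (fun count n_int1 =>
      let q1_lo := |n_ext - n_int1|
      let q1_hi := n_ext + n_int1
      (PySem.List.pyRange (max 1 q1_lo) (q1_hi + 1) 1).foldl (fun count q1 =>
        if PySem.Int.mod (n_ext + n_int1 + q1) 2 = 0 then count
        else
          (PySem.List.pyRange 0 (n_max + 1) 1).foldl (fun count n_int2 =>
            let q2_lo := |n_int1 - n_int2|
            let q2_hi := n_int1 + n_int2
            (PySem.List.pyRange (max 1 q2_lo) (q2_hi + 1) 1).foldl (fun count q2 =>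
              if PySem.Int.mod (n_int1 + n_int2 + q2) 2 = 0 then count
              else count + 1) count) count) count) 0
  [("n_max", n_max), ("term_count", count)]

-- ===== PORT B =====
-- number of integers q with lo <= q <= hi and q % 2 == r (closed form; _parity_count in Source B)
def parityCount (lo hi r : Int) : Int :=
  if hi < lo then 0
  else
    let first := if PySem.Int.mod lo 2 = r then lo else lo + 1
    if first > hi then 0
    else PySem.Int.floordiv (hi - first) 2 + 1

def two_loop_SE_O_count_alt (n_max : Int) : List (String × Int) :=
  let n_ext : Int := 1
  let total : Int :=
    (PySem.List.pyRange 0 (n_max + 1) 1).foldl (fun total n1 =>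
      let v1 := parityCount (max 1 |n_ext - n1|) (n_ext + n1) (PySem.Int.mod (n_ext + n1 + 1) 2)
      let inner :=
        (PySem.List.pyRange 0 (n_max + 1) 1).foldl (fun inner n2 =>
          inner + parityCount (max 1 |n1 - n2|) (n1 + n2) (PySem.Int.mod (n1 + n2 + 1) 2)) 0
      total + v1 * inner) 0
  [("n_max", n_max), ("term_count", total)]

-- ===== PRECONDITION & SPEC =====
def Spec_two_loop_SE_O_count (n_max : Int) (out : List (String × Int)) : Prop := out = two_loop_SE_O_count_alt n_max
instance (n_max : Int) (out : List (String × Int)) : Decidable (Spec_two_loop_SE_O_count n_max out) := by unfold Spec_two_loop_SE_O_count; infer_instance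

-- ===== CLAIM (what is proved, stated in full; the proofs are below) =====
def Claim_equal_two_loop_SE_O_count : Prop := ∀ (n_max : Int), Dom_two_loop_SE_O_count n_max → Spec_two_loop_SE_O_count n_max (two_loop_SE_O_count n_max)

-- ===== LEMMAS AND PROOFS =====

lemma pc_nil (lo hi r : Int) (h : hi < lo) : parityCount lo hi r = 0 := by
  unfold parityCount; rw [if_pos h]

lemma pc_succ (lo hi r : Int) (h : lo ≤ hi) (hr : r = 0 ∨ r = 1) :
    parityCount lo hi r = (if lo % 2 = r then 1 else 0) + parityCount (lo + 1) hi r := by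
  simp only [parityCount, PySem.Int.mod_eq_emod_of_pos (show (0:Int) < 2 by norm_num),
    PySem.Int.floordiv_eq_ediv_of_pos (show (0:Int) < 2 by norm_num)]
  split_ifs <;> omega

-- A's photon-q loop, with I added per valid q, equals (closed-form parity count) * I.
lemma qloop (s I : Int) (n : Nat) : ∀ (a b c : Int), (b - a).toNat = n →
    (PySem.List.pyRange a b 1).foldl
      (fun c q => if PySem.Int.mod (s + q) 2 = 0 then c else c + I) c
    = c + parityCount a (b - 1) (PySem.Int.mod (s + 1) 2) * I := by
  induction n with
  | zero =>
    intro a b c h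
    rw [PySem.List.pyRange_one_eq_nil (by omega), pc_nil _ _ _ (by omega)]
    simp
  | succ n ih =>
    intro a b c h
    have hab : a < b := by omega
    rw [PySem.List.pyRange_one_cons hab, List.foldl_cons]
    have hm2 : PySem.Int.mod (s + a) 2 = (s + a) % 2 :=
      PySem.Int.mod_eq_emod_of_pos (by norm_num)
    have hr2 : PySem.Int.mod (s + 1) 2 = (s + 1) % 2 :=
      PySem.Int.mod_eq_emod_of_pos (by norm_num)
    rw [pc_succ a (b - 1) _ (by omega) (by rw [hr2]; omega)]
    by_cases hp : PySem.Int.mod (s + a) 2 = 0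
    · rw [if_pos hp, ih (a + 1) b c (by omega), if_neg (by rw [hr2]; omega)]
      ring
    · rw [if_neg hp, ih (a + 1) b (c + I) (by omega), if_pos (by rw [hr2]; omega)]
      ring

lemma counts_eq (n_max : Int) :
    ((PySem.List.pyRange 0 (n_max + 1) 1).foldl (fun count n_int1 =>
      (PySem.List.pyRange (max 1 |1 - n_int1|) (1 + n_int1 + 1) 1).foldl (fun count q1 =>
        if PySem.Int.mod (1 + n_int1 + q1) 2 = 0 then count
        else
          (PySem.List.pyRange 0 (n_max + 1) 1).foldl (fun count n_int2 =>
            (PySem.List.pyRange (max 1 |n_int1 - n_int2|) (n_int1 + n_int2 + 1) 1).foldl (fun count q2 =>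
              if PySem.Int.mod (n_int1 + n_int2 + q2) 2 = 0 then count
              else count + 1) count) count) count) (0 : Int))
    = ((PySem.List.pyRange 0 (n_max + 1) 1).foldl (fun total n1 =>
        total + parityCount (max 1 |1 - n1|) (1 + n1) (PySem.Int.mod (1 + n1 + 1) 2) *
          ((PySem.List.pyRange 0 (n_max + 1) 1).foldl (fun inner n2 =>
            inner + parityCount (max 1 |n1 - n2|) (n1 + n2) (PySem.Int.mod (n1 + n2 + 1) 2)) 0)) (0 : Int)) := by
  apply PySem.List.foldl_congr_mem
  intro c n1 _
  -- closed form for one q2 loop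
  have hq2 : ∀ (c n2 : Int),
      (PySem.List.pyRange (max 1 |n1 - n2|) (n1 + n2 + 1) 1).foldl (fun c q2 =>
        if PySem.Int.mod (n1 + n2 + q2) 2 = 0 then c else c + 1) c
      = c + parityCount (max 1 |n1 - n2|) (n1 + n2) (PySem.Int.mod (n1 + n2 + 1) 2) := by
    intro c n2
    have := qloop (n1 + n2) 1 ((n1 + n2 + 1) - max 1 |n1 - n2|).toNat
      (max 1 |n1 - n2|) (n1 + n2 + 1) c rfl
    simpa using this
  -- the inner double loop adds a fixed amount S
  have hin : ∀ c : Int,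
      (PySem.List.pyRange 0 (n_max + 1) 1).foldl (fun c n_int2 =>
        (PySem.List.pyRange (max 1 |n1 - n_int2|) (n1 + n_int2 + 1) 1).foldl (fun c q2 =>
          if PySem.Int.mod (n1 + n_int2 + q2) 2 = 0 then c else c + 1) c) c
      = c + ((PySem.List.pyRange 0 (n_max + 1) 1).map (fun n2 =>
          parityCount (max 1 |n1 - n2|) (n1 + n2) (PySem.Int.mod (n1 + n2 + 1) 2))).sum := by
    intro c
    rw [PySem.List.foldl_congr_mem _ _
      (fun c n2 => c + parityCount (max 1 |n1 - n2|) (n1 + n2) (PySem.Int.mod (n1 + n2 + 1) 2)) c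
      (fun acc x _ => hq2 acc x)]
    exact PySem.List.foldl_add _ _ _
  rw [PySem.List.foldl_congr_mem _ _
    (fun c q1 => if PySem.Int.mod (1 + n1 + q1) 2 = 0 then c
      else c + ((PySem.List.pyRange 0 (n_max + 1) 1).map (fun n2 =>
        parityCount (max 1 |n1 - n2|) (n1 + n2) (PySem.Int.mod (n1 + n2 + 1) 2))).sum) c
    (by
      intro acc q1 _
      beta_reduce
      split_ifs with h
      · rfl
      · exact hin acc)]
  rw [qloop (1 + n1) _ ((1 + n1 + 1) - max 1 |1 - n1|).toNat (max 1 |1 - n1|) (1 + n1 + 1) c rfl]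
  rw [PySem.List.foldl_add]
  simp

-- ===== VERDICT (by name: the statement is the Claim_ definition above) =====
theorem two_loop_SE_O_count_spec : Claim_equal_two_loop_SE_O_count := by
  intro n_max _
  unfold Spec_two_loop_SE_O_count two_loop_SE_O_count two_loop_SE_O_count_alt
  simp only [List.cons.injEq, Prod.mk.injEq, and_true, true_and]
  exact counts_eq n_max
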